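-- pv_equiv track=rewrite | github.com/badrelbakkali/2026-ECE-Ing4-Fin-IA-Projet1-Gr02 | groupe-02-systeme-expert-medical/src/moteur_inference.py | _index_regles_par_diagnostic
-- ===== SOURCE A (Python) =====
-- from typing import Dict, List, Optional, Set, Tuple
--
-- def _index_regles_par_diagnostic(base: Dict) -> Dict[str, List[Dict]]:
--     index: Dict[str, List[Dict]] = {}
--     for r in base.get("regles", []):
--         diag = r.get("diagnostic")
--         if not diag:
--             continue
--         index.setdefault(diag, []).append(r)
--     return index
-- ===== SOURCE B (Python) =====
-- def _index_regles_par_diagnostic(base):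
--     regles = base.get("regles", [])
--     diags = list(dict.fromkeys(r.get("diagnostic") for r in regles if r.get("diagnostic")))
--     return {d: [r for r in regles if r.get("diagnostic") == d] for d in diags}
-- ===== Notes on version B (the rewrite author's own statement) =====
-- stated objective: alternative
-- what changed: Replaces the incremental setdefault-append dict build by a two-phase computation: first an ordered dedup of the truthy diagnostics, then one filter pass over the rules per diagnostic.
import Mathlib
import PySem

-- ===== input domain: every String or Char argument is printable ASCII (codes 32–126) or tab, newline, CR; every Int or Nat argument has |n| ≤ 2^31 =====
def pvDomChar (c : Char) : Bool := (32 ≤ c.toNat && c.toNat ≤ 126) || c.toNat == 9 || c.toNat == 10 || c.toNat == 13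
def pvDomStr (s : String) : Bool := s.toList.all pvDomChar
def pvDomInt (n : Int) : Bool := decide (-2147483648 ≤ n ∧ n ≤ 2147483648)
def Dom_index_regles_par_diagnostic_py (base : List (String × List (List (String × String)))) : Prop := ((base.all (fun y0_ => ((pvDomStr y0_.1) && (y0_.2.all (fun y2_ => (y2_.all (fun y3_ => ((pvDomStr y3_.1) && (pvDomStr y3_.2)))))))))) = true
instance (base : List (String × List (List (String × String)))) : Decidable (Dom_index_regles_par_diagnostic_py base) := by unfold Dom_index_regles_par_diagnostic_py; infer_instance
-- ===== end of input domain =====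

-- B builds the index in two phases (ordered dedup of truthy diagnostics, then one filter per
-- diagnostic) instead of A's incremental setdefault-append dict build; same result, alternative
-- structure, not claimed faster.

-- r.get("diagnostic") on the rule dict (first match, None if missing)
def pvDiag (r : List (String × String)) : Option String :=
  (PySem.Dict.mk r).get? "diagnostic"

-- ===== PORT A =====
-- loop body of A: skip falsy diag, else index.setdefault(diag, []).append(r)
-- (setdefault+append is ported as Dict.modify: index[diag] = index.get(diag, []) + [r], exact)
def pvStepA (idx : PySem.Dict String (List (List (String × String))))
    (r : List (String × String)) : PySem.Dict String (List (List (String × String))) :=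
  match pvDiag r with
  | none => idx
  | some d => if d = "" then idx else idx.modify d [] (· ++ [r])

def index_regles_par_diagnostic_py (base : List (String × List (List (String × String)))) : List (String × List (List (String × String))) :=
  let regles := (PySem.Dict.mk base).getD "regles" []
  (regles.foldl pvStepA PySem.Dict.empty).items

-- ===== PORT B =====
-- the generator 'r.get("diagnostic") for r in regles if r.get("diagnostic")' (truthy filter)
def pvDiagT (r : List (String × String)) : Option String :=
  match pvDiag r with
  | none => none
  | some d => if d = "" then none else some d

def index_regles_par_diagnostic_py_alt (base : List (String × List (List (String × String)))) : List (String × List (List (String × String))) :=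
  let regles := (PySem.Dict.mk base).getD "regles" []
  let diags := PySem.List.dedup (regles.filterMap pvDiagT)
  diags.map (fun d => (d, regles.filter (fun r => pvDiag r == some d)))

-- ===== PRECONDITION & SPEC =====
def Spec_index_regles_par_diagnostic_py (base : List (String × List (List (String × String)))) (out : List (String × List (List (String × String)))) : Prop := out = index_regles_par_diagnostic_py_alt base
instance (base : List (String × List (List (String × String)))) (out : List (String × List (List (String × String)))) : Decidable (Spec_index_regles_par_diagnostic_py base out) := by unfold Spec_index_regles_par_diagnostic_py; infer_instance

-- ===== CLAIM (what is proved, stated in full; the proofs are below) =====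
def Claim_equal_index_regles_par_diagnostic_py : Prop := ∀ (base : List (String × List (List (String × String)))), Dom_index_regles_par_diagnostic_py base → Spec_index_regles_par_diagnostic_py base (index_regles_par_diagnostic_py base)

-- ===== LEMMAS AND PROOFS =====

theorem pvDiagT_ne_empty {r : List (String × String)} {d : String}
    (h : pvDiagT r = some d) : d ≠ "" := by
  unfold pvDiagT at h
  cases hd : pvDiag r with
  | none => rw [hd] at h; exact absurd h (by simp)
  | some d' =>
    rw [hd] at h
    by_cases h' : d' = ""
    · simp [h'] at h
    · simp [h'] at h
      subst h; exact h'

theorem pvMem_dedupT_ne_empty {l : List (List (String × String))} {d : String}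
    (h : d ∈ PySem.List.dedup (l.filterMap pvDiagT)) : d ≠ "" := by
  rw [PySem.List.mem_dedup] at h
  obtain ⟨r, _, hr⟩ := List.mem_filterMap.mp h
  exact pvDiagT_ne_empty hr

theorem pvDedup_append_singleton {α : Type} [DecidableEq α] (xs : List α) (x : α) :
    PySem.List.dedup (xs ++ [x]) =
      if x ∈ PySem.List.dedup xs then PySem.List.dedup xs else PySem.List.dedup xs ++ [x] := by
  simp only [PySem.List.dedup_eq_ofList, PySem.Set.ofList_eq_foldl, List.foldl_append,
    List.foldl_cons, List.foldl_nil]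
  rw [← PySem.Set.ofList_eq_foldl]
  simp [PySem.Set.add, PySem.Set.contains]

theorem pvMainInvariant (l : List (List (String × String))) :
    (l.foldl pvStepA PySem.Dict.empty).items =
      (PySem.List.dedup (l.filterMap pvDiagT)).map
        (fun d => (d, l.filter (fun r => pvDiag r == some d))) := by
  induction l using List.reverseRecOn with
  | nil => rfl
  | append_singleton l r ih =>
    rw [List.foldl_append, List.foldl_cons, List.foldl_nil,
      List.filterMap_append]
    set D := l.foldl pvStepA PySem.Dict.empty with hD
    have hkeys : D.keys = PySem.List.dedup (l.filterMap pvDiagT) := by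
      simp only [PySem.Dict.keys, ih, List.map_map]
      simp [Function.comp_def]
    have hnd : D.keys.Nodup := by rw [hkeys]; exact PySem.List.nodup_dedup _
    cases ht : pvDiagT r with
    | none =>
      have hstep : pvStepA D r = D := by
        unfold pvStepA
        unfold pvDiagT at ht
        cases hd : pvDiag r with
        | none => rfl
        | some d' =>
          rw [hd] at ht
          by_cases h' : d' = ""
          · simp [h']
          · simp [h'] at ht
      rw [hstep, List.filterMap_cons, ht, List.filterMap_nil, List.append_nil, ih]
      apply List.map_congr_left
      intro d hd
      have hdne : d ≠ "" := pvMem_dedupT_ne_empty hd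
      congr 1
      rw [List.filter_append]
      have hfalse : (pvDiag r == some d) = false := by
        unfold pvDiagT at ht
        cases hdr : pvDiag r with
        | none => simp
        | some d' =>
          rw [hdr] at ht
          by_cases h' : d' = ""
          · subst h'; simp [Ne.symm hdne]
          · simp [h'] at ht
      simp [hfalse]
    | some d0 =>
      have hd0 : pvDiag r = some d0 ∧ d0 ≠ "" := by
        unfold pvDiagT at ht
        cases hdr : pvDiag r with
        | none => rw [hdr] at ht; simp at ht
        | some d' =>
          rw [hdr] at ht
          by_cases h' : d' = ""
          · simp [h'] at ht
          · simp [h'] at ht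
            subst ht; exact ⟨rfl, h'⟩
      have hstep : pvStepA D r = D.modify d0 [] (· ++ [r]) := by
        unfold pvStepA; rw [hd0.1]; simp [hd0.2]
      rw [hstep, List.filterMap_cons, ht, List.filterMap_nil]
      rw [show (PySem.List.dedup (l.filterMap pvDiagT ++ [d0])) = _ from
        pvDedup_append_singleton (l.filterMap pvDiagT) d0]
      by_cases hmem : d0 ∈ PySem.List.dedup (l.filterMap pvDiagT)
      · -- key already present: modify rewrites the entry in place
        have hcont : D.contains d0 = true := by
          rw [PySem.Dict.contains_iff_mem_keys, hkeys]; exact hmem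
        have hitem : (d0, l.filter (fun r' => pvDiag r' == some d0)) ∈ D.items := by
          rw [ih]; exact List.mem_map_of_mem hmem
        have hgetD : D.getD d0 [] = l.filter (fun r' => pvDiag r' == some d0) :=
          PySem.Dict.getD_of_mem_items D hitem hnd []
        simp only [PySem.Dict.modify, PySem.Dict.insert, hcont, if_pos, hgetD]
        simp only [ih, List.map_map, if_pos hmem]
        apply List.map_congr_left
        intro d hd
        simp only [Function.comp]
        by_cases hdd : d = d0
        · subst hdd
          simp [List.filter_append, hd0.1]
        · have : (d == d0) = false := by simp [hdd]
          simp only [this, Bool.false_eq_true, if_false]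
          congr 1
          rw [List.filter_append]
          have : (pvDiag r == some d) = false := by
            rw [hd0.1]; simp [Ne.symm hdd]
          simp [this]
      · -- fresh key: modify appends a new entry at the end
        have hcont : D.contains d0 = false := by
          rw [Bool.eq_false_iff]
          intro hc
          exact hmem (hkeys ▸ (PySem.Dict.contains_iff_mem_keys _ _).mp hc)
        have hgetD : D.getD d0 [] = [] := PySem.Dict.getD_of_not_contains D [] hcont
        simp only [PySem.Dict.modify, PySem.Dict.insert, hcont, hgetD]
        simp only [Bool.false_eq_true, if_false, if_neg hmem, List.map_append, List.map_cons,
          List.map_nil]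
        have hfilter0 : l.filter (fun r' => pvDiag r' == some d0) = [] := by
          rw [List.filter_eq_nil_iff]
          intro r' hr' hcontra
          apply hmem
          rw [PySem.List.mem_dedup]
          apply List.mem_filterMap.mpr
          refine ⟨r', hr', ?_⟩
          unfold pvDiagT
          rw [show pvDiag r' = some d0 from by simpa using hcontra]
          simp [hd0.2]
        congr 1
        · rw [ih]
          apply List.map_congr_left
          intro d hd
          congr 1
          rw [List.filter_append]
          have hdd : d ≠ d0 := fun h => hmem (h ▸ hd)
          have : (pvDiag r == some d) = false := by
            rw [hd0.1]; simp [Ne.symm hdd]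
          simp [this]
        · simp [List.filter_append, hd0.1, hfilter0]

-- ===== VERDICT (by name: the statement is the Claim_ definition above) =====
theorem index_regles_par_diagnostic_py_spec : Claim_equal_index_regles_par_diagnostic_py := by
  intro base _
  unfold Spec_index_regles_par_diagnostic_py
  unfold index_regles_par_diagnostic_py index_regles_par_diagnostic_py_alt
  exact pvMainInvariant _
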